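-- pv_equiv track=rewrite | github.com/woosang0430/Programmers | 온코더/3회 코딩테스트/test2.py | solution
-- ===== SOURCE A (Python) =====
-- def solution(x):
--     stick, cnt = 64, 0
--     while stick:
--         # stick이 x보다 크면 반으로 자르기
--         if stick > x:
--             stick //= 2
--         # x랑 같거나 작으면 x 에서 stick만큼 빼주고 cnt 반복
--         else:
--             x -= stick
--             cnt += 1
--
--     return cnt
-- ===== SOURCE B (Python) =====
-- def solution(x):
--     cnt = 0
--     for p in (64, 32, 16, 8, 4, 2, 1):
--         if x >= p:
--             cnt += x // p
--             x %= p
--     return cnt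
-- ===== Notes on version B (the rewrite author's own statement) =====
-- stated objective: faster
-- what changed: Replaces A's while-loop of one-at-a-time subtractions of the current power of two by a single quotient/remainder step per fixed power (64,32,...,1).
import Mathlib
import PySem

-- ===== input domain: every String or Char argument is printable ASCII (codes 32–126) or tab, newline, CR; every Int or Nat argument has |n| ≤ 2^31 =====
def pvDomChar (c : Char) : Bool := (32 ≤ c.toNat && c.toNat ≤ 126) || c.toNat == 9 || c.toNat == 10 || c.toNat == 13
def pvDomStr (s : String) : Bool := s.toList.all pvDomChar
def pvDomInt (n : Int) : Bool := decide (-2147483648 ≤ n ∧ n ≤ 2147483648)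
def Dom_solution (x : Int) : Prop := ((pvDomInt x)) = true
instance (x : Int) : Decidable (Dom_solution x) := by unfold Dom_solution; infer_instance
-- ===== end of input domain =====

-- B replaces A's one-at-a-time repeated subtraction of powers of two by one quotient/remainder
-- step per power (64..1), an O(1) pass instead of a loop linear in x.


-- ===== PORT A =====
-- A's while loop; stick only ever holds 64,32,16,8,4,2,1,0, so it is carried as a Nat
-- (which also certifies termination: 'stick //= 2' on a negative Int would not terminate).
def solutionLoop (stick : Nat) (x cnt : Int) : Int :=
  if stick ≠ 0 then
    if (stick : Int) > x then solutionLoop (stick / 2) x cnt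
    else solutionLoop stick (x - stick) (cnt + 1)
  else cnt
termination_by stick + x.toNat
decreasing_by
  · omega
  · have : (stick : Int) ≤ x := by omega
    omega

def solution (x : Int) : Int := solutionLoop 64 x 0

-- ===== PORT B =====
-- for p in (64,32,16,8,4,2,1): if x >= p: cnt += x // p; x %= p
def altStep (s : Int × Int) (p : Int) : Int × Int :=
  if p ≤ s.1 then (PySem.Int.mod s.1 p, s.2 + PySem.Int.floordiv s.1 p) else s

def solution_alt (x : Int) : Int :=
  (([64, 32, 16, 8, 4, 2, 1] : List Int).foldl altStep (x, 0)).2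

-- ===== PRECONDITION & SPEC =====
def Spec_solution (x : Int) (out : Int) : Prop := out = solution_alt x
instance (x : Int) (out : Int) : Decidable (Spec_solution x out) := by unfold Spec_solution; infer_instance

-- ===== CLAIM (what is proved, stated in full; the proofs are below) =====
def Claim_equal_solution : Prop := ∀ (x : Int), Dom_solution x → Spec_solution x (solution x)

-- ===== LEMMAS AND PROOFS =====

theorem solutionLoop_zero (x cnt : Int) : solutionLoop 0 x cnt = cnt := by
  rw [solutionLoop]; simp

-- B's fold step written componentwise, to line it up with A's collapsed pass.
theorem altStep_snd (x cnt p : Int) :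
    altStep (x, cnt) p =
      (if p ≤ x then PySem.Int.mod x p else x,
       cnt + if p ≤ x then PySem.Int.floordiv x p else 0) := by
  unfold altStep
  split_ifs <;> simp

-- One pass of A's loop at a fixed stick: repeated subtraction collapses to quotient/remainder.
theorem solutionLoop_step (stick : Nat) (hs : stick ≠ 0) (x cnt : Int) :
    solutionLoop stick x cnt =
      solutionLoop (stick / 2)
        (if (stick : Int) ≤ x then PySem.Int.mod x stick else x)
        (cnt + if (stick : Int) ≤ x then PySem.Int.floordiv x stick else 0) := by
  by_cases hx : (stick : Int) ≤ x
  · have hs' : (0 : Int) < (stick : Int) := by exact_mod_cast Nat.pos_of_ne_zero hs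
    -- strong induction on x.toNat
    have main : ∀ n : Nat, ∀ x cnt : Int, x.toNat = n → (stick : Int) ≤ x →
        solutionLoop stick x cnt =
          solutionLoop (stick / 2) (PySem.Int.mod x stick)
            (cnt + PySem.Int.floordiv x stick) := by
      intro n
      induction n using Nat.strong_induction_on with
      | _ n ih =>
        intro x cnt hn hx
        rw [solutionLoop]
        simp only [hs, if_true, ne_eq, not_false_iff]
        rw [if_neg (by omega)]
        have hmod : x % (stick : Int) = (x - stick) % stick := (Int.sub_emod_right x stick).symm
        have hdiv : x / (stick : Int) = (x - stick) / stick + 1 := by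
          have h := Int.add_mul_ediv_right (x - (stick : Int)) 1 (c := (stick : Int)) (by omega)
          rw [one_mul, sub_add_cancel] at h
          rw [h]
        by_cases h2 : (stick : Int) ≤ x - stick
        · rw [ih (x - stick).toNat (by omega) _ _ rfl h2]
          congr 1
          · rw [PySem.Int.mod_eq_emod_of_pos hs', PySem.Int.mod_eq_emod_of_pos hs']
            omega
          · rw [PySem.Int.floordiv_eq_ediv_of_pos hs', PySem.Int.floordiv_eq_ediv_of_pos hs']
            omega
        · -- x - stick < stick : one more iteration then the halving branch
          have hm0 : (x - stick) % (stick : Int) = x - stick :=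
            Int.emod_eq_of_lt (by omega) (by omega)
          have hd0 : (x - stick) / (stick : Int) = 0 :=
            Int.ediv_eq_zero_of_lt (by omega) (by omega)
          rw [solutionLoop]
          simp only [hs, if_true, ne_eq, not_false_iff]
          rw [if_pos (by omega)]
          congr 1
          · rw [PySem.Int.mod_eq_emod_of_pos hs']; omega
          · rw [PySem.Int.floordiv_eq_ediv_of_pos hs']; omega
    rw [if_pos hx, if_pos hx]
    exact main x.toNat x cnt rfl hx
  · rw [if_neg hx, if_neg hx]
    rw [solutionLoop]
    simp only [hs, if_true, ne_eq, not_false_iff]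
    rw [if_pos (by omega)]
    simp

-- ===== VERDICT (by name: the statement is the Claim_ definition above) =====
theorem solution_spec : Claim_equal_solution := by
  intro x _
  unfold Spec_solution solution solution_alt
  rw [solutionLoop_step 64 (by decide), solutionLoop_step 32 (by decide),
      solutionLoop_step 16 (by decide), solutionLoop_step 8 (by decide),
      solutionLoop_step 4 (by decide), solutionLoop_step 2 (by decide),
      solutionLoop_step 1 (by decide), solutionLoop_zero]
  simp only [List.foldl, altStep_snd]
  push_cast
  rfl
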